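-- pv_equiv track=rewrite | github.com/faustodavid/smith | src/smith/formatting.py | _group_contiguous_lines
-- ===== SOURCE A (Python) =====
-- def _group_contiguous_lines(sorted_line_nums: list[int]) -> list[list[int]]:
--     blocks: list[list[int]] = []
--     current_block: list[int] = []
--     for line_num in sorted_line_nums:
--         if current_block and line_num > current_block[-1] + 1:
--             blocks.append(current_block)
--             current_block = []
--         current_block.append(line_num)
--     if current_block:
--         blocks.append(current_block)
--     return blocks
-- ===== SOURCE B (Python) =====
-- def _group_contiguous_lines(sorted_line_nums: list[int]) -> list[list[int]]:
--     # Backward pass: build the blocks back-to-front (each block reversed),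
--     # then undo both reversals at the end.
--     groups: list[list[int]] = []
--     for x in reversed(sorted_line_nums):
--         if groups and groups[-1][-1] <= x + 1:
--             groups[-1].append(x)
--         else:
--             groups.append([x])
--     return [g[::-1] for g in reversed(groups)]
-- ===== Notes on version B (the rewrite author's own statement) =====
-- stated objective: alternative
-- what changed: B traverses the list right-to-left, building the blocks back-to-front with each block held reversed, and restores order with a final double reversal, instead of A's forward pass with a current-block accumulator flushed into the result.
import Mathlib
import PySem

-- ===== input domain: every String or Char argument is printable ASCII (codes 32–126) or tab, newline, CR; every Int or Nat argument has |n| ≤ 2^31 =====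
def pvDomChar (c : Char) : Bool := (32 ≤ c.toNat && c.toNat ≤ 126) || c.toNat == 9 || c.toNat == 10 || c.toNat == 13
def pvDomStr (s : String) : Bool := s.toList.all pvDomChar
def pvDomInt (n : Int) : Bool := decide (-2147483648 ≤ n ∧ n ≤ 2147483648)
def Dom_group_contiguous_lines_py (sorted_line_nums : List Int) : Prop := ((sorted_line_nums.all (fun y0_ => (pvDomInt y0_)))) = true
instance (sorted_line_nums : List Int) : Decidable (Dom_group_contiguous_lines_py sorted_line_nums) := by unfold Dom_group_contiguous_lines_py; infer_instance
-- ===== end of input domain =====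

-- B replaces A's forward pass (current-block accumulator flushed into the result) by a
-- backward pass that builds the blocks back-to-front, each block reversed, and undoes
-- both reversals at the end; same O(n) cost, alternative traversal.

-- ===== PORT A =====
-- one loop iteration of A: state = (blocks, current_block)
def pvAStep (st : List (List Int) × List Int) (line_num : Int) : List (List Int) × List Int :=
  if st.2 ≠ [] ∧ line_num > (PySem.List.pyGet? st.2 (-1)).getD 0 + 1 then
    (st.1 ++ [st.2], [] ++ [line_num])
  else
    (st.1, st.2 ++ [line_num])

def group_contiguous_lines_py (sorted_line_nums : List Int) : List (List Int) :=
  let st := sorted_line_nums.foldl pvAStep ([], [])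
  if st.2 ≠ [] then st.1 ++ [st.2] else st.1

-- ===== PORT B =====
-- one loop iteration of B (over the reversed input): groups[-1][-1] <= x+1 → append to last group
def pvBStep (groups : List (List Int)) (x : Int) : List (List Int) :=
  if groups ≠ [] ∧ (PySem.List.pyGet? ((PySem.List.pyGet? groups (-1)).getD []) (-1)).getD 0 ≤ x + 1 then
    groups.dropLast ++ [((PySem.List.pyGet? groups (-1)).getD []) ++ [x]]
  else
    groups ++ [[x]]

def group_contiguous_lines_py_alt (sorted_line_nums : List Int) : List (List Int) :=
  let groups := sorted_line_nums.reverse.foldl pvBStep []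
  groups.reverse.map (fun g => (PySem.List.slice? g none none (-1)).getD [])

-- ===== PRECONDITION & SPEC =====
def Spec_group_contiguous_lines_py (sorted_line_nums : List Int) (out : List (List Int)) : Prop := out = group_contiguous_lines_py_alt sorted_line_nums
instance (sorted_line_nums : List Int) (out : List (List Int)) : Decidable (Spec_group_contiguous_lines_py sorted_line_nums out) := by unfold Spec_group_contiguous_lines_py; infer_instance

-- ===== CLAIM (what is proved, stated in full; the proofs are below) =====
def Claim_equal_group_contiguous_lines_py : Prop := ∀ (sorted_line_nums : List Int), Dom_group_contiguous_lines_py sorted_line_nums → Spec_group_contiguous_lines_py sorted_line_nums (group_contiguous_lines_py sorted_line_nums)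

-- ===== LEMMAS AND PROOFS =====

-- reference grouping function both ports are proved equal to
def pvGrp : List Int → List (List Int)
  | [] => []
  | x :: xs =>
    match pvGrp xs with
    | (y :: g) :: gs => if y ≤ x + 1 then (x :: y :: g) :: gs else [x] :: (y :: g) :: gs
    | gs => [x] :: gs

def pvLastE (l : List Int) : Int := (PySem.List.pyGet? l (-1)).getD 0

def pvMergeInto (cur : List Int) (G : List (List Int)) : List (List Int) :=
  match G with
  | (y :: g) :: gs => if y ≤ pvLastE cur + 1 then (cur ++ y :: g) :: gs else cur :: G
  | _ => cur :: G

theorem pvLastE_append_singleton (l : List Int) (x : Int) : pvLastE (l ++ [x]) = x := by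
  simp [pvLastE, PySem.List.pyGet?_neg_one]

theorem pvLastE_singleton (x : Int) : pvLastE [x] = x := by
  simp [pvLastE, PySem.List.pyGet?_neg_one]

theorem pvGrp_cons (x : Int) (xs : List Int) : pvGrp (x :: xs) = pvMergeInto [x] (pvGrp xs) := by
  show (match pvGrp xs with
    | (y :: g) :: gs => if y ≤ x + 1 then (x :: y :: g) :: gs else [x] :: (y :: g) :: gs
    | gs => [x] :: gs) = _
  rcases h : pvGrp xs with _ | ⟨_ | ⟨y, g⟩, gs⟩ <;>
    simp [pvMergeInto, pvLastE_singleton]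

theorem pvMergeInto_ne_nil (cur : List Int) (hc : cur ≠ []) (G : List (List Int))
    (hG : ∀ g ∈ G, g ≠ []) : ∀ g ∈ pvMergeInto cur G, g ≠ [] := by
  rcases G with _ | ⟨_ | ⟨y, g⟩, gs⟩
  · simpa [pvMergeInto] using hc
  · exact absurd rfl (hG [] (by simp))
  · simp only [pvMergeInto]
    split_ifs <;> intro b hb <;> rcases List.mem_cons.mp hb with rfl | hb2
    · simp [hc]
    · exact hG _ (List.mem_cons_of_mem _ hb2)
    · exact hc
    · exact hG _ hb2

theorem pvGrp_ne_nil (xs : List Int) : ∀ g ∈ pvGrp xs, g ≠ [] := by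
  induction xs with
  | nil => simp [pvGrp]
  | cons x xs ih => rw [pvGrp_cons]; exact pvMergeInto_ne_nil [x] (by simp) _ ih

theorem pvMergeInto_not (cur : List Int) (x : Int) (G : List (List Int))
    (h : pvLastE cur + 1 < x) :
    pvMergeInto cur (pvMergeInto [x] G) = cur :: pvMergeInto [x] G := by
  rcases G with _ | ⟨_ | ⟨y, g⟩, gs⟩ <;>
    simp only [pvMergeInto, pvLastE_singleton] <;>
    split_ifs <;> simp_all <;> omega

theorem pvMergeInto_assoc (cur : List Int) (x : Int) (G : List (List Int))
    (h : x ≤ pvLastE cur + 1) :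
    pvMergeInto (cur ++ [x]) G = pvMergeInto cur (pvMergeInto [x] G) := by
  rcases G with _ | ⟨_ | ⟨y, g⟩, gs⟩ <;>
    simp only [pvMergeInto, pvLastE_singleton, pvLastE_append_singleton] <;>
    split_ifs <;> simp_all <;> omega

-- A's loop invariant
theorem pvA_inv (xs : List Int) : ∀ blocks cur, cur ≠ [] →
    (let st := xs.foldl pvAStep (blocks, cur)
     if st.2 ≠ [] then st.1 ++ [st.2] else st.1) = blocks ++ pvMergeInto cur (pvGrp xs) := by
  induction xs with
  | nil => intro blocks cur hc; simp only [List.foldl_nil]; simp [pvGrp, pvMergeInto, hc]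
  | cons x xs ih =>
    intro blocks cur hc
    simp only [List.foldl_cons]
    rw [pvGrp_cons]
    by_cases h : (PySem.List.pyGet? cur (-1)).getD 0 + 1 < x
    · have hstep : pvAStep (blocks, cur) x = (blocks ++ [cur], [x]) := by
        unfold pvAStep; rw [if_pos ⟨hc, h⟩]
        rfl
      rw [hstep, ih _ _ (by simp), pvMergeInto_not cur x _ (by simpa [pvLastE] using h)]
      simp
    · have hstep : pvAStep (blocks, cur) x = (blocks, cur ++ [x]) := by
        unfold pvAStep; rw [if_neg]; rintro ⟨_, hx⟩; exact h hx
      rw [hstep, ih _ _ (by simp), pvMergeInto_assoc cur x _ (by simpa [pvLastE] using not_lt.mp h)]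

theorem pvA_eq_grp (xs : List Int) : group_contiguous_lines_py xs = pvGrp xs := by
  cases xs with
  | nil => simp [group_contiguous_lines_py, pvGrp]
  | cons x xs =>
    have hstep : pvAStep ([], []) x = ([], [x]) := by simp [pvAStep]
    have := pvA_inv xs [] [x] (by simp)
    simp only [group_contiguous_lines_py, List.foldl_cons, hstep] at *
    rw [this, pvGrp_cons]; simp

-- B side: the state after folding over the reversed list encodes pvGrp reversed twice
def pvRep (G : List (List Int)) : List (List Int) := (G.map List.reverse).reverse

theorem pvBStep_rep (x : Int) (G : List (List Int)) (hne : ∀ g ∈ G, g ≠ []) :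
    pvBStep (pvRep G) x = pvRep (pvMergeInto [x] G) := by
  rcases G with _ | ⟨_ | ⟨y, g⟩, gs⟩
  · simp [pvBStep, pvRep, pvMergeInto]
  · exact absurd rfl (hne [] (by simp))
  · have hlast : (PySem.List.pyGet? (pvRep ((y :: g) :: gs)) (-1)).getD [] = (y :: g).reverse := by
      simp [pvRep, PySem.List.pyGet?_neg_one]
    have hlast2 : (PySem.List.pyGet? (y :: g).reverse (-1)).getD 0 = y := by
      simp [PySem.List.pyGet?_neg_one, List.getLast?_reverse]
    by_cases h : y ≤ x + 1
    · have : pvBStep (pvRep ((y :: g) :: gs)) x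
          = (pvRep ((y :: g) :: gs)).dropLast ++ [(y :: g).reverse ++ [x]] := by
        simp [pvBStep, h, pvRep]
      rw [this]
      simp [pvRep, pvMergeInto, pvLastE_singleton, h, List.dropLast_append_of_ne_nil]
    · have : pvBStep (pvRep ((y :: g) :: gs)) x = pvRep ((y :: g) :: gs) ++ [[x]] := by
        simp [pvBStep, hlast, h]
      rw [this]
      simp [pvRep, pvMergeInto, pvLastE_singleton, h]

theorem pvB_inv (xs : List Int) : xs.reverse.foldl pvBStep [] = pvRep (pvGrp xs) := by
  induction xs with
  | nil => simp [pvRep, pvGrp]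
  | cons x xs ih =>
    rw [List.reverse_cons, List.foldl_append, ih, List.foldl_cons, List.foldl_nil,
      pvBStep_rep x _ (pvGrp_ne_nil xs), pvGrp_cons]

theorem pvB_eq_grp (xs : List Int) : group_contiguous_lines_py_alt xs = pvGrp xs := by
  simp only [group_contiguous_lines_py_alt, pvB_inv, pvRep]
  simp [PySem.List.slice?_none_none_neg_one, List.map_map]

-- ===== VERDICT (by name: the statement is the Claim_ definition above) =====
theorem group_contiguous_lines_py_spec : Claim_equal_group_contiguous_lines_py := by
  intro xs _
  unfold Spec_group_contiguous_lines_py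
  rw [pvA_eq_grp, pvB_eq_grp]
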